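-- pv_equiv track=rewrite | github.com/MSNYC/svelo | src/svelo/decoders.py | _playfair_digraphs
-- ===== SOURCE A (Python) =====
-- from typing import Callable, List, Optional
--
-- def _playfair_digraphs(text: str) -> List[str]:
--     raw = "".join(ch for ch in text.upper() if "A" <= ch <= "Z").replace("J", "I")
--     pairs = []
--     idx = 0
--     while idx < len(raw):
--         a = raw[idx]
--         b = raw[idx + 1] if idx + 1 < len(raw) else "X"
--         if a == b:
--             pairs.append(a + "X")
--             idx += 1
--         else:
--             pairs.append(a + b)
--             idx += 2
--     if pairs and len(pairs[-1]) == 1: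
--         pairs[-1] = pairs[-1] + "X"
--     return pairs
-- ===== SOURCE B (Python) =====
-- def _playfair_digraphs(text: str):
--     raw = "".join(ch for ch in text.upper() if "A" <= ch <= "Z").replace("J", "I")
--     pairs = []
--     pending = ""
--     for ch in raw:
--         if not pending:
--             pending = ch
--         elif pending == ch:
--             pairs.append(pending + "X")
--             pending = ch
--         else:
--             pairs.append(pending + ch)
--             pending = ""
--     if pending:
--         pairs.append(pending + "X")
--     return pairs
-- ===== Notes on version B (the rewrite author's own statement) =====
-- stated objective: simpler
-- what changed: Replaces the variable-stride while-loop with manual subscripting (and its dead last-pair fix-up) by a single for-loop over the characters carrying one held-back character as state.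
import Mathlib
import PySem

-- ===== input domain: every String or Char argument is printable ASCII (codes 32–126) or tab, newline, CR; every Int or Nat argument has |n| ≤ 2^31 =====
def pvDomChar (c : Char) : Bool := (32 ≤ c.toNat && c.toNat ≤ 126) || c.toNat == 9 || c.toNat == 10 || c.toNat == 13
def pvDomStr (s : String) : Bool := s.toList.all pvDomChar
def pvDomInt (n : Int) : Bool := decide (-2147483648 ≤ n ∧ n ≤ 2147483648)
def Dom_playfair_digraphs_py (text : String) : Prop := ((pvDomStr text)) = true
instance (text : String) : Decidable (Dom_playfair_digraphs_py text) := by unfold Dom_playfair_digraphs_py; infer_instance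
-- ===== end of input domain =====

-- B replaces A's manual-index while loop (and its dead final fix-up) by one for-loop carrying a
-- single pending character as state; same output, simpler decomposition (objective: simpler).
-- Strings inside the loops are represented as List Char and turned into String at the end.

-- ===== PORT A =====
-- A's while loop: raw[idx] is the head of the remaining suffix, idx+1 / idx+2 drop 1 / 2 chars.
def pvALoop : List Char → List (List Char)
  | [] => []
  | a :: rest =>
      let b := rest.headD 'X'          -- raw[idx+1] if it exists else "X"
      if a == b then [a, 'X'] :: pvALoop rest
      else [a, b] :: pvALoop (rest.drop 1)
termination_by l => l.length
decreasing_by all_goals simp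

def playfair_digraphs_py (text : String) : List String :=
  let raw := PySem.Chars.replace (((PySem.Str.upper text).toList).filter
      (fun c => 'A' ≤ c && c ≤ 'Z')) ['J'] ['I']
  let pairs := pvALoop raw
  -- if pairs and len(pairs[-1]) == 1: pairs[-1] = pairs[-1] + "X"
  let pairs := match pairs.getLast? with
    | some s => if s.length == 1 then pairs.dropLast ++ [s ++ ['X']] else pairs
    | none => pairs
  pairs.map String.ofList

-- ===== PORT B =====
-- B's for-loop: state is the optional pending character ("" ↦ none).
def pvBLoop : List Char → Option Char → List (List Char)
  | [], none => []
  | [], some p => [[p, 'X']]           -- trailing 'if pending: append(pending + "X")'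
  | c :: rest, none => pvBLoop rest (some c)
  | c :: rest, some p =>
      if p == c then [p, 'X'] :: pvBLoop rest (some c)
      else [p, c] :: pvBLoop rest none

def playfair_digraphs_py_alt (text : String) : List String :=
  let raw := PySem.Chars.replace (((PySem.Str.upper text).toList).filter
      (fun c => 'A' ≤ c && c ≤ 'Z')) ['J'] ['I']
  (pvBLoop raw none).map String.ofList

-- ===== PRECONDITION & SPEC =====
def Spec_playfair_digraphs_py (text : String) (out : List String) : Prop := out = playfair_digraphs_py_alt text
instance (text : String) (out : List String) : Decidable (Spec_playfair_digraphs_py text out) := by unfold Spec_playfair_digraphs_py; infer_instance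

-- ===== CLAIM (what is proved, stated in full; the proofs are below) =====
def Claim_equal_playfair_digraphs_py : Prop := ∀ (text : String), Dom_playfair_digraphs_py text → Spec_playfair_digraphs_py text (playfair_digraphs_py text)

-- ===== LEMMAS AND PROOFS =====

-- B's pending-state loop equals A's indexed loop (simultaneously for both states).
theorem pvBLoop_eq_pvALoop (l : List Char) :
    pvBLoop l none = pvALoop l ∧ ∀ p, pvBLoop l (some p) = pvALoop (p :: l) := by
  induction l with
  | nil => constructor <;> simp [pvBLoop, pvALoop]
  | cons c rest ih =>
      refine ⟨?_, ?_⟩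
      · simpa [pvBLoop] using ih.2 c
      · intro p
        rw [pvALoop]
        by_cases h : p = c
        · simp [pvBLoop, h, ih.2]
        · simp [pvBLoop, h, List.headD, ih.1]

-- every pair A's loop emits has length 2, so the final fix-up never fires
theorem pvALoop_len (l : List Char) : ∀ s ∈ pvALoop l, s.length = 2 := by
  induction l using pvALoop.induct with
  | case1 => simp [pvALoop]
  | case2 a rest b h ih =>
      intro s hs
      rw [pvALoop] at hs
      simp only [show rest.headD 'X' = b from rfl, if_pos h, List.mem_cons] at hs
      rcases hs with hs | hs
      · simp [hs]
      · exact ih s hs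
  | case3 a rest b h ih =>
      intro s hs
      rw [pvALoop] at hs
      simp only [show rest.headD 'X' = b from rfl, if_neg h, List.mem_cons] at hs
      rcases hs with hs | hs
      · simp [hs]
      · exact ih s hs

-- ===== VERDICT (by name: the statement is the Claim_ definition above) =====
theorem playfair_digraphs_py_spec : Claim_equal_playfair_digraphs_py := by
  intro text _
  unfold Spec_playfair_digraphs_py playfair_digraphs_py playfair_digraphs_py_alt
  simp only [(pvBLoop_eq_pvALoop _).1]
  set raw := PySem.Chars.replace (((PySem.Str.upper text).toList).filter
      (fun c => 'A' ≤ c && c ≤ 'Z')) ['J'] ['I'] with hraw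
  cases hl : (pvALoop raw).getLast? with
  | none => simp
  | some s =>
      have h2 : s.length = 2 := pvALoop_len raw s (List.mem_of_getLast? hl)
      simp [h2]
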